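-- pv_equiv track=rewrite | github.com/openrepublic/py-leap | src/leap/protocol/ds.py | string_to_symbol
-- ===== SOURCE A (Python) =====
-- def string_to_symbol(precision, s):
--     l = len(s)
--     if l > 7: raise Exception("invalid symbol {0}".format(s))
--     result = 0
--     for i in range(l):
--         if ord(s[i]) < ord('A') or ord(s[i]) > ord('Z'):
--             raise Exception("invalid symbol {0}".format(s))
--         else:
--             result |= (int(ord(s[i])) << (8 * (1 + i)))
--
--     result |= int(precision)
--     return result
-- ===== SOURCE B (Python) =====
-- def string_to_symbol(precision, s):
--     if len(s) > 7 or not all('A' <= c <= 'Z' for c in s):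
--         raise Exception("invalid symbol {0}".format(s))
--     return (int.from_bytes(s.encode(), 'little') << 8) | int(precision)
-- ===== Notes on version B (the rewrite author's own statement) =====
-- stated objective: simpler
-- what changed: A validates and packs character by character in an indexed loop of shift-by-8*(1+i) ORs; B validates the whole string up front with a single all() check and builds the character part loop-free as int.from_bytes(s.encode(),'little') << 8, ORing in the precision.
import Mathlib
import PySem

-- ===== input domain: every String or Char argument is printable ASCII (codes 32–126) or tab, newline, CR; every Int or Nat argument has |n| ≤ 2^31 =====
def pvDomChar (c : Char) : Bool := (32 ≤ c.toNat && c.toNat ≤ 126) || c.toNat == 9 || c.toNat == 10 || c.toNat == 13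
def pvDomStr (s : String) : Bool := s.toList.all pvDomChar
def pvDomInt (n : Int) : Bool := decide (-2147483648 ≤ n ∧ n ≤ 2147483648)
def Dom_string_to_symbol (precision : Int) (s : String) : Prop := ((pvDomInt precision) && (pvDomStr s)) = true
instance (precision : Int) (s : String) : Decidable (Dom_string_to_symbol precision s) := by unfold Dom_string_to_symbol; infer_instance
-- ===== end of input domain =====

-- B replaces A's indexed shift-and-OR loop by one whole-string validity check plus a loop-free
-- little-endian byte packing shifted by 8 (objective: simpler). Return-value equivalence only;
-- both programs raise (ports return 0, excluded by Pre_) on invalid symbols.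

-- ===== PORT A =====
-- the for-loop of A: index i, accumulator result; none = the 'raise' branch
def stsGo (result : Int) (i : Nat) : List Char → Option Int
  | [] => some result
  | c :: rest =>
    if c.toNat < 65 ∨ 90 < c.toNat then none
    else stsGo (PySem.Int.bor result ((c.toNat : Int) <<< (8 * (1 + i)))) (i + 1) rest

def string_to_symbol (precision : Int) (s : String) : Int :=
  if s.toList.length > 7 then 0          -- Python: raise Exception(...); excluded by Pre_
  else
    match stsGo 0 0 s.toList with
    | none => 0                          -- Python: raise Exception(...); excluded by Pre_
    | some result => PySem.Int.bor result precision

-- ===== PORT B =====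
-- int.from_bytes(bytes, 'little')
def fromBytesLE : List Nat → Nat
  | [] => 0
  | b :: rest => b + 256 * fromBytesLE rest

def string_to_symbol_alt (precision : Int) (s : String) : Int :=
  if s.toList.length > 7 || !(s.toList.all (fun c => 'A' ≤ c && c ≤ 'Z')) then 0
    -- Python: raise Exception(...); excluded by Pre_
  else PySem.Int.bor ((fromBytesLE (s.toList.map Char.toNat) : Int) <<< (8:Nat)) precision

-- ===== PRECONDITION & SPEC =====
-- Pre_: exactly the inputs on which Python A returns (no exception): at most 7 chars, all 'A'..'Z'
def Pre_string_to_symbol (precision : Int) (s : String) : Prop :=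
  s.toList.length ≤ 7 ∧ (s.toList.all fun c => 65 ≤ c.toNat && c.toNat ≤ 90) = true
instance (precision : Int) (s : String) : Decidable (Pre_string_to_symbol precision s) := by
  unfold Pre_string_to_symbol; infer_instance

def pvWitness_string_to_symbol : Int × String := (4, "EOS")

def Spec_string_to_symbol (precision : Int) (s : String) (out : Int) : Prop := out = string_to_symbol_alt precision s
instance (precision : Int) (s : String) (out : Int) : Decidable (Spec_string_to_symbol precision s out) := by unfold Spec_string_to_symbol; infer_instance

-- ===== CLAIM (what is proved, stated in full; the proofs are below) =====
def Claim_equal_string_to_symbol : Prop := ∀ (precision : Int) (s : String), Dom_string_to_symbol precision s → Pre_string_to_symbol precision s → Spec_string_to_symbol precision s (string_to_symbol precision s)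

-- ===== LEMMAS AND PROOFS =====

-- Char comparison of B's check, in toNat form
theorem charCheck_iff (c : Char) : ('A' ≤ c && c ≤ 'Z') = true ↔ (65 ≤ c.toNat ∧ c.toNat ≤ 90) := by
  rw [Bool.and_eq_true, decide_eq_true_iff, decide_eq_true_iff,
      show ('A' ≤ c) ↔ 65 ≤ c.toNat by rw [Char.le_def, UInt32.le_iff_toNat_le]; rfl,
      show (c ≤ 'Z') ↔ c.toNat ≤ 90 by rw [Char.le_def, UInt32.le_iff_toNat_le]; rfl]

-- A's loop, on valid chars, computes the little-endian packing shifted by 8*(1+i)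
theorem stsGo_eq (cs : List Char) : ∀ (n i : Nat),
    (∀ c ∈ cs, 65 ≤ c.toNat ∧ c.toNat ≤ 90) → n < 2 ^ (8 * (1 + i)) →
    stsGo (n : Int) i cs = some ((n + fromBytesLE (cs.map Char.toNat) * 2 ^ (8 * (1 + i)) : Nat) : Int) := by
  induction cs with
  | nil => intro n i _ _; simp [stsGo, fromBytesLE]
  | cons c cs ih =>
    intro n i hval hn
    obtain ⟨hc1, hc2⟩ := hval c (by simp)
    have hguard : ¬ (c.toNat < 65 ∨ 90 < c.toNat) := by omega
    have hpow : 2 ^ (8 * (1 + (i + 1))) = 256 * 2 ^ (8 * (1 + i)) := by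
      rw [show 8 * (1 + (i + 1)) = 8 + 8 * (1 + i) by ring, pow_add]; norm_num
    have hstep : PySem.Int.bor (n : Int) ((c.toNat : Int) <<< (8 * (1 + i)))
        = ((c.toNat * 2 ^ (8 * (1 + i)) + n : Nat) : Int) := by
      rw [← Int.natCast_shiftLeft, PySem.Int.bor_natCast]
      rw [Nat.lor_comm, ← Nat.shiftLeft_add_eq_or_of_lt hn, Nat.shiftLeft_eq]
    rw [stsGo, if_neg hguard, hstep]
    rw [ih (c.toNat * 2 ^ (8 * (1 + i)) + n) (i + 1)
        (fun d hd => hval d (by simp [hd]))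
        (by rw [hpow]
            calc c.toNat * 2 ^ (8 * (1 + i)) + n < (c.toNat + 1) * 2 ^ (8 * (1 + i)) := by
                  rw [Nat.add_mul, Nat.one_mul]; omega
              _ ≤ 256 * 2 ^ (8 * (1 + i)) := Nat.mul_le_mul_right _ (by omega))]
    congr 1
    push_cast
    simp only [List.map_cons, fromBytesLE]
    push_cast
    ring

-- ===== VERDICT (by name: the statement is the Claim_ definition above) =====
theorem string_to_symbol_spec : Claim_equal_string_to_symbol := by
  intro precision s _hdom hpre
  obtain ⟨hlen, hvalb⟩ := hpre
  rw [List.all_eq_true] at hvalb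
  have hval : ∀ c ∈ s.toList, 65 ≤ c.toNat ∧ c.toNat ≤ 90 := by
    intro c hc; have := hvalb c hc; simp only [Bool.and_eq_true, decide_eq_true_iff] at this; exact this
  unfold Spec_string_to_symbol string_to_symbol string_to_symbol_alt
  have hall : s.toList.all (fun c => 'A' ≤ c && c ≤ 'Z') = true := by
    rw [List.all_eq_true]; intro c hc; exact (charCheck_iff c).mpr (hval c hc)
  have hlen7 : ¬ (s.toList.length > 7) := by omega
  have hcond : (decide (s.toList.length > 7) || !(s.toList.all fun c => 'A' ≤ c && c ≤ 'Z')) = false := by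
    simp only [hall, Bool.not_true, Bool.or_false, decide_eq_false_iff_not]; exact hlen7
  rw [if_neg hlen7, if_neg (by rw [hcond]; simp)]
  have h0 : ((0 : Nat) : Int) = (0 : Int) := by norm_num
  rw [← h0, stsGo_eq s.toList 0 0 hval (by norm_num)]
  simp only []
  congr 1
  rw [← Int.natCast_shiftLeft, Nat.shiftLeft_eq]
  push_cast
  ring
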